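-- pv_equiv track=rewrite | github.com/Aasthaengg/IBMdataset | Python_codes/p03910/s613428101.py | solve
-- ===== SOURCE A (Python) =====
-- def solve(n):
--   s = 0
--   l = []
--   for i in range(n):
--     s += i+1
--     l += [i+1]
--     if s > n:
--       l.remove(s-n)
--       return l
--     elif s == n:
--       return l
--
--   return -1
-- ===== SOURCE B (Python) =====
-- def solve(n):
--   # Binary search for the smallest k with k*(k+1)//2 >= n, then build 1..k
--   # and drop the single excess element.  (Returns -1 for n <= 0, like A.)
--   if n <= 0:
--     return -1
--   lo, hi = 1, n
--   while lo < hi: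
--     mid = (lo + hi) // 2
--     if mid * (mid + 1) // 2 >= n:
--       hi = mid
--     else:
--       lo = mid + 1
--   k = lo
--   s = k * (k + 1) // 2
--   res = list(range(1, k + 1))
--   if s > n:
--     res.remove(s - n)
--   return res
-- ===== Notes on version B (the rewrite author's own statement) =====
-- stated objective: alternative
-- what changed: Replaces A's incremental accumulate-and-append loop by a binary search for the smallest k with k(k+1)/2 >= n, then builds 1..k directly and removes the single excess element.
-- outside the precondition, e.g. on solve(0): A returns -1, B returns -1
import Mathlib
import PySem

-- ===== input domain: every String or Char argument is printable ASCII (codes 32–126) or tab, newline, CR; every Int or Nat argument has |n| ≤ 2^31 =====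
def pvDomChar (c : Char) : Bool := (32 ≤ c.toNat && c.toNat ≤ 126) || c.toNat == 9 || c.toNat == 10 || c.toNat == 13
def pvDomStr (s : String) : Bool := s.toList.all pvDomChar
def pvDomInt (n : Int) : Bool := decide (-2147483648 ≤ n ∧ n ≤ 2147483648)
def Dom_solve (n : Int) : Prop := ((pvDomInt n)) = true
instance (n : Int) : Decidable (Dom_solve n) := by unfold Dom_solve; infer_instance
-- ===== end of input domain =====

-- B replaces A's incremental accumulate-and-append loop by a binary search for the
-- smallest k with k(k+1)//2 >= n, building 1..k directly (objective: alternative algorithm).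


-- ===== PORT A =====
-- the for-loop with early returns; none = the loop exhausted (Python then returns -1, an int)
def solveLoop (n : Int) (s : Int) (l : List Int) : List Int → Option (List Int)
  | [] => none
  | i :: rest =>
    let s' := s + (i + 1)
    let l' := l ++ [i + 1]
    if s' > n then some ((PySem.List.remove? l' (s' - n)).getD l')
    else if s' = n then some l'
    else solveLoop n s' l' rest

def solve (n : Int) : List Int :=
  -- Python returns the int -1 when the loop exhausts (n ≤ 0): not a List Int, excluded by Pre_solve
  (solveLoop n 0 [] (PySem.List.pyRange 0 n 1)).getD []

-- ===== PORT B =====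
-- k*(k+1)//2, the triangular number
def Tri (k : Int) : Int := PySem.Int.floordiv (k * (k + 1)) 2

-- while lo < hi: bisect on the smallest k with k*(k+1)//2 >= n
def bsearchK (n lo hi : Int) : Int :=
  if h : lo < hi then
    let mid := PySem.Int.floordiv (lo + hi) 2
    if n ≤ Tri mid then bsearchK n lo mid
    else bsearchK n (mid + 1) hi
  else lo
termination_by (hi - lo).toNat
decreasing_by
  · have := PySem.Int.floordiv_eq_ediv_of_pos (a := lo + hi) (b := 2) (by omega)
    simp only [this]; omega
  · have := PySem.Int.floordiv_eq_ediv_of_pos (a := lo + hi) (b := 2) (by omega)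
    simp only [this]; omega

def solve_alt (n : Int) : List Int :=
  if n ≤ 0 then []  -- Python B returns the int -1 here: not a List Int, excluded by Pre_solve
  else
    let k := bsearchK n 1 n
    let s := Tri k
    let res := PySem.List.pyRange 1 (k + 1) 1
    if s > n then (PySem.List.remove? res (s - n)).getD res else res

-- ===== PRECONDITION & SPEC =====
-- Pre_ excludes n ≤ 0, on which A's loop never runs and A returns the int -1 (not a list).
def Pre_solve (n : Int) : Prop := 1 ≤ n
instance (n : Int) : Decidable (Pre_solve n) := by unfold Pre_solve; infer_instance
def pvWitness_solve : Int := (3)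

def Spec_solve (n : Int) (out : List Int) : Prop := out = solve_alt n
instance (n : Int) (out : List Int) : Decidable (Spec_solve n out) := by unfold Spec_solve; infer_instance

-- ===== CLAIM (what is proved, stated in full; the proofs are below) =====
def Claim_equal_solve : Prop := ∀ (n : Int), Dom_solve n → Pre_solve n → Spec_solve n (solve n)

-- ===== LEMMAS AND PROOFS =====

def buildRes (n k : Int) : List Int :=
  if Tri k > n then
    (PySem.List.remove? (PySem.List.pyRange 1 (k + 1) 1) (Tri k - n)).getD
      (PySem.List.pyRange 1 (k + 1) 1)
  else PySem.List.pyRange 1 (k + 1) 1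

lemma tri_eq (k : Int) : 2 * Tri k = k * (k + 1) := by
  have hdvd : (2 : Int) ∣ k * (k + 1) := (Int.even_mul_succ_self k).two_dvd
  have hmod : PySem.Int.mod (k * (k + 1)) 2 = 0 :=
    (PySem.Int.mod_eq_zero_iff_dvd _ _).2 hdvd
  have := PySem.Int.floordiv_mul_add_mod (k * (k + 1)) 2
  unfold Tri; omega

lemma tri_lt_tri {a b : Int} (ha : 0 ≤ a) (hab : a < b) : Tri a < Tri b := by
  have h1 := tri_eq a
  have h2 := tri_eq b
  nlinarith [mul_pos (by omega : (0:Int) < b - a) (by omega : (0:Int) < b + a + 1)]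

lemma tri_le_tri {a b : Int} (ha : 0 ≤ a) (hab : a ≤ b) : Tri a ≤ Tri b := by
  rcases lt_or_eq_of_le hab with h | h
  · exact le_of_lt (tri_lt_tri ha h)
  · rw [h]

lemma self_le_tri {a : Int} (ha : 0 ≤ a) : a ≤ Tri a := by
  have := tri_eq a; nlinarith [mul_self_nonneg a]

-- the binary search returns a k with Tri (k-1) < n ≤ Tri k
lemma bsearch_post (n : Int) : ∀ (m : Nat) (lo hi : Int), (hi - lo).toNat ≤ m →
    1 ≤ lo → lo ≤ hi → Tri (lo - 1) < n → n ≤ Tri hi →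
    1 ≤ bsearchK n lo hi ∧ bsearchK n lo hi ≤ hi ∧
      n ≤ Tri (bsearchK n lo hi) ∧ Tri (bsearchK n lo hi - 1) < n := by
  intro m
  induction m with
  | zero =>
    intro lo hi hm h1 h2 h3 h4
    have hlohi : lo = hi := by omega
    rw [bsearchK]
    simp only [hlohi, lt_irrefl, dif_neg, not_false_iff]
    subst hlohi
    exact ⟨h1, le_refl _, h4, h3⟩
  | succ m ih =>
    intro lo hi hm h1 h2 h3 h4
    rw [bsearchK]
    by_cases hlt : lo < hi
    · simp only [dif_pos hlt]
      have hmid := PySem.Int.floordiv_eq_ediv_of_pos (a := lo + hi) (b := 2) (by omega)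
      have hb1 : lo ≤ PySem.Int.floordiv (lo + hi) 2 := by rw [hmid]; omega
      have hb2 : PySem.Int.floordiv (lo + hi) 2 < hi := by rw [hmid]; omega
      by_cases hc : n ≤ Tri (PySem.Int.floordiv (lo + hi) 2)
      · rw [if_pos hc]
        obtain ⟨p1, p2, p3, p4⟩ := ih lo _ (by omega) h1 hb1 h3 hc
        exact ⟨p1, by omega, p3, p4⟩
      · rw [if_neg hc]
        have hTri : Tri (PySem.Int.floordiv (lo + hi) 2 + 1 - 1) < n := by
          have h5 : ¬ n ≤ Tri (PySem.Int.floordiv (lo + hi) 2) := hc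
          have h6 : PySem.Int.floordiv (lo + hi) 2 + 1 - 1 = PySem.Int.floordiv (lo + hi) 2 := by
            ring
          rw [h6]; omega
        exact ih _ hi (by omega) (by omega) (by omega) hTri h4
    · simp only [dif_neg hlt]
      have : lo = hi := by omega
      subst this
      exact ⟨h1, le_refl _, h4, h3⟩

-- A's loop, started after j full iterations, returns buildRes n k for the least k
lemma loopA_eq (n k : Int) (hk0 : 1 ≤ k) (hk1 : n ≤ Tri k) (hk2 : Tri (k - 1) < n) :
    ∀ (m : Nat) (j : Int), (k - j).toNat ≤ m → 0 ≤ j → j < k →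
      solveLoop n (Tri j) (PySem.List.pyRange 1 (j + 1) 1) (PySem.List.pyRange j n 1)
        = some (buildRes n k) := by
  have hkn : k ≤ n := by
    have := self_le_tri (a := k - 1) (by omega)
    omega
  intro m
  induction m with
  | zero => intro j hm h0 hjk; omega
  | succ m ih =>
    intro j hm h0 hjk
    have hjn : j < n := by omega
    rw [PySem.List.pyRange_one_cons hjn]
    have hs' : Tri j + (j + 1) = Tri (j + 1) := by
      have h1 := tri_eq j
      have h2 := tri_eq (j + 1)
      nlinarith
    have hl' : PySem.List.pyRange 1 (j + 1) 1 ++ [j + 1] = PySem.List.pyRange 1 (j + 1 + 1) 1 :=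
      (PySem.List.pyRange_one_succ_right (a := 1) (b := j + 1) (by omega)).symm
    simp only [solveLoop, hs', hl']
    by_cases hgt : Tri (j + 1) > n
    · have hkj : k = j + 1 := by
        by_contra hne
        have : j + 1 ≤ k - 1 := by omega
        have := tri_le_tri (a := j + 1) (b := k - 1) (by omega) this
        omega
      subst hkj
      rw [if_pos hgt, buildRes, if_pos hgt]
    · rw [if_neg hgt]
      by_cases heq : Tri (j + 1) = n
      · have hkj : k = j + 1 := by
          by_contra hne
          have : j + 1 ≤ k - 1 := by omega
          have := tri_le_tri (a := j + 1) (b := k - 1) (by omega) this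
          omega
        subst hkj
        rw [if_pos heq, buildRes, if_neg hgt]
      · rw [if_neg heq]
        have hjk' : j + 1 < k := by
          by_contra hge
          have hkj : k = j + 1 := by omega
          rw [hkj] at hk1
          omega
        exact ih (j + 1) (by omega) (by omega) hjk'

-- ===== VERDICT (by name: the statement is the Claim_ definition above) =====
theorem solve_spec : Claim_equal_solve := by
  intro n _ hpre
  unfold Pre_solve at hpre
  unfold Spec_solve solve solve_alt
  rw [if_neg (by omega : ¬ n ≤ 0)]
  set k := bsearchK n 1 n with hk
  have hpost := bsearch_post n (n - 1).toNat 1 n (by omega) (by omega) hpre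
    (by
      have h0 : Tri (1 - 1) = 0 := by decide
      omega)
    (self_le_tri (by omega : (0:Int) ≤ n))
  obtain ⟨hk1, hk2, hk3, hk4⟩ := hpost
  have hloop := loopA_eq n k hk1 hk3 hk4 k.toNat 0 (by omega) (by omega) (by omega)
  have h00 : Tri 0 = 0 := by decide
  have hnil : PySem.List.pyRange 1 (0 + 1) 1 = [] := by
    simp [PySem.List.pyRange_one_eq_nil (a := 1) (b := 1) le_rfl]
  rw [h00, hnil] at hloop
  rw [hloop]
  simp only [Option.getD_some, buildRes, Tri]
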